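-- pv_equiv track=rewrite | github.com/MemeFormer/Multi_Agent | src/tools/patch_tool.py | find_context_core
-- ===== SOURCE A (Python) =====
-- from typing import (
--     Callable,
--     Dict,
--     List,
--     Optional,
--     Tuple,
--     Union,
-- )
--
-- def find_context_core(
--     lines: List[str], context: List[str], start: int
-- ) -> Tuple[int, int]:
--     """Core logic to find the context block, returns start index and fuzz level."""
--     if not context: # If context is empty, match immediately at start
--         return start, 0
--
--     # Exact match first
--     for i in range(start, len(lines) - len(context) + 1):
--         if lines[i : i + len(context)] == context:
--             return i, 0
--
--     # Match ignoring trailing whitespace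
--     context_rstrip = [s.rstrip() for s in context]
--     for i in range(start, len(lines) - len(context) + 1):
--         lines_slice_rstrip = [s.rstrip() for s in lines[i : i + len(context)]]
--         if lines_slice_rstrip == context_rstrip:
--             return i, 1 # Low fuzz level
--
--     # Match ignoring all leading/trailing whitespace
--     context_strip = [s.strip() for s in context]
--     for i in range(start, len(lines) - len(context) + 1):
--          lines_slice_strip = [s.strip() for s in lines[i : i + len(context)]]
--          if lines_slice_strip == context_strip:
--             return i, 100 # High fuzz level
--
--     return -1, 0 # Not found
-- ===== SOURCE B (Python) =====
-- def find_context_core(lines, context, start):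
--     """Single pass: record first match index for each fuzz level, pick by priority."""
--     if not context:
--         return start, 0
--     m = len(context)
--     c_r = [s.rstrip() for s in context]
--     c_s = [s.strip() for s in context]
--     e1 = e2 = None
--     for i in range(start, len(lines) - m + 1):
--         sl = lines[i:i + m]
--         if sl == context:
--             return i, 0
--         if e1 is None and [s.rstrip() for s in sl] == c_r:
--             e1 = i
--         if e2 is None and [s.strip() for s in sl] == c_s:
--             e2 = i
--     if e1 is not None:
--         return e1, 1
--     if e2 is not None:
--         return e2, 100
--     return -1, 0
-- ===== Notes on version B (the rewrite author's own statement) =====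
-- stated objective: alternative
-- what changed: B replaces A's three sequential scans (exact, rstrip, strip) with one pass over the candidate window that records the first match index for each fuzz level and picks by priority afterwards, returning immediately on an exact match.
import Mathlib
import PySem

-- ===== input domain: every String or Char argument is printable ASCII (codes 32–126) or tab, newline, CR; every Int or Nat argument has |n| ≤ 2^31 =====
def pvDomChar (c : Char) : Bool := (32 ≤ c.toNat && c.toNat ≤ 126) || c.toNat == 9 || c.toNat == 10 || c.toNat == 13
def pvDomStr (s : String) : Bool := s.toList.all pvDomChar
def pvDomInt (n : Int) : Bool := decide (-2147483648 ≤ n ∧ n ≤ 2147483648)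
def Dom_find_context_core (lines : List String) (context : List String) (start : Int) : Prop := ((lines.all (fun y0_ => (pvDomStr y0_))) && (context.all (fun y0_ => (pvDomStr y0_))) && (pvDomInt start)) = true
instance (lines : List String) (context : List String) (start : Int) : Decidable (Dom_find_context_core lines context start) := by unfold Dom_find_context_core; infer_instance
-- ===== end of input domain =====

-- B makes one pass instead of A's three, recording the first match index per fuzz level; return value proved identical.

-- ===== PORT A =====
-- Literal transliteration of A: three 'for' loops over range(start, len(lines)-len(context)+1),
-- each modelled as List.find? over the same index list (the loop returns at the first hit).
def find_context_core (lines : List String) (context : List String) (start : Int) : Int × Int :=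
  if context = [] then (start, 0)
  else
    let r := PySem.List.pyRange start ((lines.length : Int) - (context.length : Int) + 1) 1
    match r.find? (fun i => PySem.List.slice lines (some i) (some (i + (context.length : Int))) == context) with
    | some i => (i, 0)
    | none =>
      let cr := context.map PySem.Str.rstrip
      match r.find? (fun i => (PySem.List.slice lines (some i) (some (i + (context.length : Int)))).map PySem.Str.rstrip == cr) with
      | some i => (i, 1)
      | none =>
        let cs := context.map PySem.Str.strip
        match r.find? (fun i => (PySem.List.slice lines (some i) (some (i + (context.length : Int)))).map PySem.Str.strip == cs) with
        | some i => (i, 100)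
        | none => (-1, 0)

-- ===== PORT B =====
-- B's single loop: early return on exact match, otherwise remember first rstrip/strip match indices.
def fccLoop (lines context cr cs : List String) : List Int → Option Int → Option Int → Int × Int
  | [], e1, e2 =>
      match e1 with
      | some j => (j, 1)
      | none =>
        match e2 with
        | some j => (j, 100)
        | none => (-1, 0)
  | i :: rest, e1, e2 =>
      let sl := PySem.List.slice lines (some i) (some (i + (context.length : Int)))
      if sl == context then (i, 0)
      else
        fccLoop lines context cr cs rest
          (if e1.isNone && (sl.map PySem.Str.rstrip == cr) then some i else e1)
          (if e2.isNone && (sl.map PySem.Str.strip == cs) then some i else e2)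

def find_context_core_alt (lines : List String) (context : List String) (start : Int) : Int × Int :=
  if context = [] then (start, 0)
  else
    fccLoop lines context (context.map PySem.Str.rstrip) (context.map PySem.Str.strip)
      (PySem.List.pyRange start ((lines.length : Int) - (context.length : Int) + 1) 1) none none

-- ===== PRECONDITION & SPEC =====
def Spec_find_context_core (lines : List String) (context : List String) (start : Int) (out : Int × Int) : Prop := out = find_context_core_alt lines context start
instance (lines : List String) (context : List String) (start : Int) (out : Int × Int) : Decidable (Spec_find_context_core lines context start out) := by unfold Spec_find_context_core; infer_instance

-- ===== CLAIM (what is proved, stated in full; the proofs are below) =====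
def Claim_equal_find_context_core : Prop := ∀ (lines : List String) (context : List String) (start : Int), Dom_find_context_core lines context start → Spec_find_context_core lines context start (find_context_core lines context start)

-- ===== LEMMAS AND PROOFS =====

-- B's loop state (e1, e2) unfolds to A's structure: first exact hit wins, else first recorded
-- (or future first) rstrip hit, else strip hit.
theorem fccLoop_eq (lines context cr cs : List String) : ∀ (r : List Int) (e1 e2 : Option Int),
    fccLoop lines context cr cs r e1 e2 =
      match r.find? (fun i => PySem.List.slice lines (some i) (some (i + (context.length : Int))) == context) with
      | some i => (i, 0)
      | none =>
        match (match e1 with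
               | some j => some j
               | none => r.find? (fun i => (PySem.List.slice lines (some i) (some (i + (context.length : Int)))).map PySem.Str.rstrip == cr)) with
        | some j => (j, 1)
        | none =>
          match (match e2 with
                 | some j => some j
                 | none => r.find? (fun i => (PySem.List.slice lines (some i) (some (i + (context.length : Int)))).map PySem.Str.strip == cs)) with
          | some j => (j, 100)
          | none => (-1, 0) := by
  intro r
  induction r with
  | nil =>
      intro e1 e2
      cases e1 <;> cases e2 <;> simp [fccLoop]
  | cons i rest ih =>
      intro e1 e2
      simp only [fccLoop, List.find?]
      by_cases h0 : (PySem.List.slice lines (some i) (some (i + (context.length : Int))) == context) = true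
      · simp [h0]
      · rw [Bool.not_eq_true] at h0
        simp only [h0, Bool.false_eq_true, if_false, ih]
        cases h1 : ((PySem.List.slice lines (some i) (some (i + (context.length : Int)))).map PySem.Str.rstrip == cr) <;>
          cases h2 : ((PySem.List.slice lines (some i) (some (i + (context.length : Int)))).map PySem.Str.strip == cs) <;>
          cases e1 <;> cases e2 <;> simp_all

-- ===== VERDICT (by name: the statement is the Claim_ definition above) =====
theorem find_context_core_spec : Claim_equal_find_context_core := by
  intro lines context start _
  unfold Spec_find_context_core find_context_core find_context_core_alt
  by_cases hc : context = []
  · simp [hc]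
  · simp only [if_neg hc, fccLoop_eq]
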